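-- pv_equiv track=rewrite | github.com/navarrojulian5/CS1-Fall22 | mp2_mastermind.py | count_letter_matches
-- ===== SOURCE A (Python) =====
-- def count_letter_matches(first_str, second_str):
--     """
--     Given two string 'first_str' and 'second_str', returns the number of letters of the two strings
--     that are the same no matter the order.
--
--     Paramenters:
--         'first_str' and 'second_str' (str) - Four letter strings that are going to be compared.
--
--     Returns:
--         (integer) - Returns the number of letters of the two string ('first_str' and 'second_str')
--         that are the same regardless of order.
--     """
--     count = 0
--     lst_first_str = list(first_str)
--     lst_second_str = list(second_str)
--     for lst in lst_first_str:
--         if lst in lst_second_str: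
--             count += 1
--             lst_second_str.remove(lst)
--     return count
-- ===== SOURCE B (Python) =====
-- def count_letter_matches(first_str, second_str):
--     # Frequency-table formulation: the number of common letters (with multiplicity)
--     # is the sum over distinct letters of the minimum of the two occurrence counts.
--     lst_first = list(first_str)
--     lst_second = list(second_str)
--     total = 0
--     for ch in set(lst_first):
--         total += min(lst_first.count(ch), lst_second.count(ch))
--     return total
-- ===== Notes on version B (the rewrite author's own statement) =====
-- stated objective: faster
-- what changed: Replaces the scan-with-mutation loop (membership test plus remove on a residual copy of the second string) by counting passes: sum over the distinct letters of the first string of the minimum of the two occurrence counts (multiset intersection size).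
import Mathlib
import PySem

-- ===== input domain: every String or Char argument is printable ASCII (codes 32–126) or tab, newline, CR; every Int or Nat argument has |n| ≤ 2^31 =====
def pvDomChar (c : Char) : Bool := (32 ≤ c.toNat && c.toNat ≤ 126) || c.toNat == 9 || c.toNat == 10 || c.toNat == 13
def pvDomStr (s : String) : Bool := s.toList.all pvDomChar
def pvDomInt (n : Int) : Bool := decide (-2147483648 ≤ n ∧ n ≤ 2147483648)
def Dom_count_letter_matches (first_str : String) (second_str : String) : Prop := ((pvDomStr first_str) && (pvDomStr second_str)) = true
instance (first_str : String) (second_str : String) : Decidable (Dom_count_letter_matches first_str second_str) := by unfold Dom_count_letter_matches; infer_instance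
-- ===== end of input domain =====

-- B re-states the greedy match-and-remove loop as a per-letter frequency count
-- (sum of minimum occurrence counts over the distinct letters of the first string).

-- ===== PORT A =====
-- loop state: (count, residual copy of the second string's letters)
def count_letter_matches (first_str : String) (second_str : String) : Int :=
  (first_str.toList.foldl
    (fun (st : Int × List Char) c =>
      if c ∈ st.2 then (st.1 + 1, st.2.erase c) else st)
    (0, second_str.toList)).1

-- ===== PORT B =====
def count_letter_matches_alt (first_str : String) (second_str : String) : Int :=
  (PySem.Set.ofList first_str.toList).foldl
    (fun (total : Int) c =>
      total + min ((first_str.toList.count c : Int)) ((second_str.toList.count c : Int)))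
    0

-- ===== PRECONDITION & SPEC =====
def Spec_count_letter_matches (first_str : String) (second_str : String) (out : Int) : Prop := out = count_letter_matches_alt first_str second_str
instance (first_str : String) (second_str : String) (out : Int) : Decidable (Spec_count_letter_matches first_str second_str out) := by unfold Spec_count_letter_matches; infer_instance

-- ===== CLAIM (what is proved, stated in full; the proofs are below) =====
def Claim_equal_count_letter_matches : Prop := ∀ (first_str : String) (second_str : String), Dom_count_letter_matches first_str second_str → Spec_count_letter_matches first_str second_str (count_letter_matches first_str second_str)

-- ===== LEMMAS AND PROOFS =====

-- A's loop counts the size of the multiset intersection.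
theorem pvA_loop (l1 : List Char) : ∀ (l2 : List Char) (n : Int),
    (l1.foldl (fun (st : Int × List Char) c =>
        if c ∈ st.2 then (st.1 + 1, st.2.erase c) else st) (n, l2)).1
      = n + (((l1 : Multiset Char) ∩ (l2 : Multiset Char)).card : Int) := by
  induction l1 with
  | nil => intro l2 n; simp
  | cons a l1 ih =>
    intro l2 n
    by_cases h : a ∈ l2
    · simp only [List.foldl_cons, if_pos h, ih]
      rw [show ((a :: l1 : List Char) : Multiset Char) = a ::ₘ (l1 : Multiset Char) from rfl,
        Multiset.cons_inter_of_pos _ (by simpa using h)]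
      have : ((l2.erase a : List Char) : Multiset Char) = (l2 : Multiset Char).erase a := by
        simp [← Multiset.coe_erase]
      rw [this, Multiset.card_cons]
      push_cast
      ring
    · simp only [List.foldl_cons, if_neg h, ih]
      rw [show ((a :: l1 : List Char) : Multiset Char) = a ::ₘ (l1 : Multiset Char) from rfl,
        Multiset.cons_inter_of_neg _ (by simpa using h)]

-- B's fold is the sum of minima over the distinct letters of l1.
theorem pvB_fold (l1 l2 : List Char) :
    ((PySem.Set.ofList l1).foldl
      (fun (total : Int) c => total + min ((l1.count c : Int)) ((l2.count c : Int))) 0)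
      = (((PySem.Set.ofList l1).map
          (fun c => min ((l1.count c : Int)) ((l2.count c : Int)))).sum) := by
  rw [PySem.List.foldl_add]
  simp

-- sum of minima over a nodup list covering l1's support = card of the multiset intersection
theorem pvMinSum (l1 l2 : List Char) :
    (((PySem.Set.ofList l1).map
        (fun c => min ((l1.count c : Int)) ((l2.count c : Int)))).sum)
      = (((l1 : Multiset Char) ∩ (l2 : Multiset Char)).card : Int) := by
  have hnd : (PySem.Set.ofList l1).Nodup := by
    rw [← PySem.List.dedup_eq_ofList]; exact PySem.List.nodup_dedup l1
  -- turn the list sum into a Finset sum over the finset of distinct letters of l1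
  have hfs : ((⟨((PySem.Set.ofList l1 : List Char) : Multiset Char), hnd⟩ : Finset Char))
      = (l1 : Multiset Char).toFinset := by
    apply Finset.ext
    intro a
    simp [Finset.mem_mk, ← PySem.List.dedup_eq_ofList, PySem.List.mem_dedup]
  have h1 : (((PySem.Set.ofList l1).map
        (fun c => min ((l1.count c : Int)) ((l2.count c : Int)))).sum)
      = ∑ a ∈ (l1 : Multiset Char).toFinset,
          min ((l1.count a : Int)) ((l2.count a : Int)) := by
    rw [← hfs]
    rfl
  rw [h1]
  have h2 : ∀ a : Char, min ((l1.count a : Int)) ((l2.count a : Int))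
      = ((((l1 : Multiset Char) ∩ (l2 : Multiset Char)).count a : Int)) := by
    intro a
    rw [Multiset.count_inter]
    push_cast
    simp [List.count_eq_countP]
  simp only [h2]
  rw [← Nat.cast_sum]
  congr 1
  -- ∑ over l1.toFinset of count in (l1 ∩ l2) = card (l1 ∩ l2)
  rw [← Multiset.toFinset_sum_count_eq ((l1 : Multiset Char) ∩ (l2 : Multiset Char))]
  symm
  apply Finset.sum_subset
  · intro a ha
    rw [Multiset.mem_toFinset] at ha ⊢
    exact Multiset.mem_of_le (Multiset.inter_le_left) ha
  · intro a _ ha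
    rw [Multiset.mem_toFinset] at ha
    exact Multiset.count_eq_zero_of_notMem ha

-- ===== VERDICT (by name: the statement is the Claim_ definition above) =====
theorem count_letter_matches_spec : Claim_equal_count_letter_matches := by
  intro f s _
  unfold Spec_count_letter_matches count_letter_matches count_letter_matches_alt
  rw [pvA_loop, pvB_fold, pvMinSum]
  simp
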